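-- pv_equiv track=rewrite | github.com/jrenx/Perspect | rr/get_def.py | get_watchpoint_trace
-- ===== SOURCE A (Python) =====
-- def get_watchpoint_trace(watchpoint, branch_num, trace):
--     """
--     Get the list of instructions that write to watchpoint
--     :param watchpoint: watchpoint address
--     :param branch_num: the number of branch breakpoint hits, after which
--     the trace is ignored
--     :param trace: the trace that contains list of (watchpoint, instruction)
--     pairs as returned by parse_watchpoints
--     :return: list of instructions
--     """
--     instructions = []
--
--     branch_count, index = 0, 0
--     while branch_count < branch_num:
--         if trace[index][1] is None:
--             branch_count += 1
--         elif trace[index][0] == watchpoint: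
--             instructions.append(trace[index][0])
--         index += 1
--
--     return instructions
-- ===== SOURCE B (Python) =====
-- def get_watchpoint_trace(watchpoint, branch_num, trace):
--     # Pass 1: just locate the window end (index-based, so too few
--     # None-entries still raises IndexError like the original).
--     branch_count, index = 0, 0
--     while branch_count < branch_num:
--         if trace[index][1] is None:
--             branch_count += 1
--         index += 1
--     # Pass 2: filter the window.
--     return [trace[i][0] for i in range(index)
--             if trace[i][1] is not None and trace[i][0] == watchpoint]
-- ===== Notes on version B (the rewrite author's own statement) =====
-- stated objective: alternative
-- what changed: Splits A's single fused accumulate loop into two passes: an index-only while loop that locates the cutoff index where the branch_num-th None entry has been consumed, then a separate list comprehension filtering that window.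
import Mathlib
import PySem

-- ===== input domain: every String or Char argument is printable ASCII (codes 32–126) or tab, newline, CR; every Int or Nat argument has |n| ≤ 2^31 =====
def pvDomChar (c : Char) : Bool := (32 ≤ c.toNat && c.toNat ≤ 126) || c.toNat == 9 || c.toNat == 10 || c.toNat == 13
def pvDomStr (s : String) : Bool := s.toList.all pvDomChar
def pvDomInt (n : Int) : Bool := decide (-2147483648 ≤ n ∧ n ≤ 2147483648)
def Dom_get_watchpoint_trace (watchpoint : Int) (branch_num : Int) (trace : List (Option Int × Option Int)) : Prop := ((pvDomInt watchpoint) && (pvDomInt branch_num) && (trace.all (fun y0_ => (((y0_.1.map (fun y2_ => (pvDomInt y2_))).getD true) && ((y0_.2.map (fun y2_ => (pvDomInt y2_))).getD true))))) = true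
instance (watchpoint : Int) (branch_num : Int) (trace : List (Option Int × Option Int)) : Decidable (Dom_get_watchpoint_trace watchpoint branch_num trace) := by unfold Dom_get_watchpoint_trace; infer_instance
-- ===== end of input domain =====

-- B splits A's fused accumulate loop into a cutoff-locating pass plus a filter pass over that window (alternative decomposition; return value only).
-- ===== PORT A =====
-- A's while loop: consume the trace one entry at a time, counting None-second
-- entries until branch_count reaches branch_num, appending matching firsts.
def get_watchpoint_trace_go (watchpoint : Int) (branch_num : Int) (branch_count : Int) : List (Option Int × Option Int) → List Int
  | [] => []
  | (a, b) :: t =>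
    if branch_count < branch_num then
      if b = none then get_watchpoint_trace_go watchpoint branch_num (branch_count + 1) t
      else if a = some watchpoint then watchpoint :: get_watchpoint_trace_go watchpoint branch_num branch_count t
      else get_watchpoint_trace_go watchpoint branch_num branch_count t
    else []

def get_watchpoint_trace (watchpoint : Int) (branch_num : Int) (trace : List (Option Int × Option Int)) : List Int :=
  get_watchpoint_trace_go watchpoint branch_num 0 trace

-- ===== PORT B =====
-- Pass 1 of Source B: the index-only while loop locating the cutoff index.
def get_watchpoint_trace_cut (branch_num : Int) (branch_count : Int) : List (Option Int × Option Int) → Nat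
  | [] => 0
  | (_, b) :: t =>
    if branch_count < branch_num then
      get_watchpoint_trace_cut branch_num (if b = none then branch_count + 1 else branch_count) t + 1
    else 0

-- Pass 2 of Source B: the list comprehension over the window.
def get_watchpoint_trace_alt (watchpoint : Int) (branch_num : Int) (trace : List (Option Int × Option Int)) : List Int :=
  (trace.take (get_watchpoint_trace_cut branch_num 0 trace)).filterMap
    (fun p => if p.2 ≠ none ∧ p.1 = some watchpoint then some watchpoint else none)

-- ===== PRECONDITION & SPEC =====
-- Pre_ excludes exactly the inputs where A raises IndexError: fewer than
-- branch_num None-second entries in the trace (B raises IndexError there too).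
def Pre_get_watchpoint_trace (watchpoint : Int) (branch_num : Int) (trace : List (Option Int × Option Int)) : Prop :=
  branch_num ≤ ((trace.countP (fun p => p.2 == none) : Nat) : Int)
instance (watchpoint : Int) (branch_num : Int) (trace : List (Option Int × Option Int)) : Decidable (Pre_get_watchpoint_trace watchpoint branch_num trace) := by unfold Pre_get_watchpoint_trace; infer_instance
def pvWitness_get_watchpoint_trace : Int × Int × (List (Option Int × Option Int)) :=
  (1, 1, [(some 1, some 2), (none, none)])

def Spec_get_watchpoint_trace (watchpoint : Int) (branch_num : Int) (trace : List (Option Int × Option Int)) (out : List Int) : Prop := out = get_watchpoint_trace_alt watchpoint branch_num trace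
instance (watchpoint : Int) (branch_num : Int) (trace : List (Option Int × Option Int)) (out : List Int) : Decidable (Spec_get_watchpoint_trace watchpoint branch_num trace out) := by unfold Spec_get_watchpoint_trace; infer_instance

-- ===== CLAIM (what is proved, stated in full; the proofs are below) =====
def Claim_equal_get_watchpoint_trace : Prop := ∀ (watchpoint : Int) (branch_num : Int) (trace : List (Option Int × Option Int)), Dom_get_watchpoint_trace watchpoint branch_num trace → Pre_get_watchpoint_trace watchpoint branch_num trace → Spec_get_watchpoint_trace watchpoint branch_num trace (get_watchpoint_trace watchpoint branch_num trace)

-- ===== LEMMAS AND PROOFS =====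
-- The fused loop equals the cutoff-then-filter composition (unconditionally:
-- at exhaustion both sides agree on the filtered prefix).
theorem gwt_key (watchpoint branch_num : Int) :
    ∀ (t : List (Option Int × Option Int)) (c : Int),
      get_watchpoint_trace_go watchpoint branch_num c t =
        (t.take (get_watchpoint_trace_cut branch_num c t)).filterMap
          (fun p => if p.2 ≠ none ∧ p.1 = some watchpoint then some watchpoint else none) := by
  intro t
  induction t with
  | nil => intro c; simp [get_watchpoint_trace_go, get_watchpoint_trace_cut]
  | cons hd tl ih =>
    intro c
    obtain ⟨a, b⟩ := hd
    by_cases hc : c < branch_num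
    · by_cases hb : b = none
      · simp [get_watchpoint_trace_go, get_watchpoint_trace_cut, hc, hb, ih]
      · by_cases ha : a = some watchpoint <;>
          simp [get_watchpoint_trace_go, get_watchpoint_trace_cut, hc, hb, ha, ih]
    · simp [get_watchpoint_trace_go, get_watchpoint_trace_cut, hc]

-- ===== VERDICT (by name: the statement is the Claim_ definition above) =====
theorem get_watchpoint_trace_spec : Claim_equal_get_watchpoint_trace := by
  intro watchpoint branch_num trace _ _
  unfold Spec_get_watchpoint_trace get_watchpoint_trace get_watchpoint_trace_alt
  exact gwt_key watchpoint branch_num trace 0
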